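-- pv_equiv track=rewrite | github.com/jemcghee3/ThinkPython | 09_07_exercise_7.py | word_reader
-- ===== SOURCE A (Python) =====
-- def letter_checker(c1, c2, c3, c4, c5, c6):
--     return c1 == c2 and c3 == c4 and c5 == c6
--
-- def word_reader(word):
--     if len(word) < 6:
--         return False
--     i = 0
--     while i <= len(word) - 6:
--         if letter_checker(word[i], word[i+1], word[i+2], word[i+3], word[i+4], word[i+5]) is True:
--             return True
--         i += 1
--     return False
-- ===== SOURCE B (Python) =====
-- def word_reader(word):
--     # Single pass maintaining per-parity streak counters of consecutive equal
--     # adjacent pairs; three consecutive pairs of the same parity form the window.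
--     even = odd = 0
--     for j in range(len(word) - 1):
--         if word[j] == word[j + 1]:
--             if j % 2 == 0:
--                 even += 1
--                 if even == 3:
--                     return True
--             else:
--                 odd += 1
--                 if odd == 3:
--                     return True
--         else:
--             if j % 2 == 0:
--                 even = 0
--             else:
--                 odd = 0
--     return False
-- ===== Notes on version B (the rewrite author's own statement) =====
-- stated objective: alternative
-- what changed: B replaces A's sliding six-character window (re-testing three pair equalities per position) by a single pass that maintains two streak counters of consecutive equal adjacent pairs, one per index parity, returning True when a streak reaches three.
import Mathlib
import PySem

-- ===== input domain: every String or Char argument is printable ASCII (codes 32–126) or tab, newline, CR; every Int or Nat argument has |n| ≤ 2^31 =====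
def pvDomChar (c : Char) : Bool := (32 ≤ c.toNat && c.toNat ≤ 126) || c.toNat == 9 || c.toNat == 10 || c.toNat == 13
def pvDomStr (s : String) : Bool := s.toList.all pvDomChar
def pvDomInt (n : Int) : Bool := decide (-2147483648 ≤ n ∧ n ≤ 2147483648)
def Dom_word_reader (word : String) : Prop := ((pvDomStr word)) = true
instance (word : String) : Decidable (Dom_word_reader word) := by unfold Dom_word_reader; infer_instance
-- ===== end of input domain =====

-- B replaces A's sliding six-character window by a single pass with two per-parity
-- streak counters of consecutive equal adjacent pairs (alternative decomposition, same cost).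


-- ===== PORT A =====
-- letter_checker(c1,...,c6) = c1==c2 and c3==c4 and c5==c6
def letter_checker (c1 c2 c3 c4 c5 c6 : Option Char) : Bool :=
  c1 == c2 && c3 == c4 && c5 == c6

-- A's while loop: `rem` = number of remaining iterations (len-5-i at entry)
def wrLoop (cs : List Char) (i : Nat) : Nat → Bool
  | 0 => false
  | rem + 1 =>
    if letter_checker cs[i]? cs[i+1]? cs[i+2]? cs[i+3]? cs[i+4]? cs[i+5]? then true
    else wrLoop cs (i + 1) rem

def word_reader (word : String) : Bool :=
  let cs := word.toList
  if cs.length < 6 then false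
  else wrLoop cs 0 (cs.length - 5)

-- ===== PORT B =====
-- B's for loop over j in range(len-1): state = (even, odd) streak counters; `rem` = remaining iterations
def wrAltLoop (cs : List Char) : Nat → Nat → Nat → Nat → Bool
  | _, _, _, 0 => false
  | j, e, o, rem + 1 =>
    if cs[j]? == cs[j+1]? then
      if j % 2 == 0 then
        (if e + 1 == 3 then true else wrAltLoop cs (j+1) (e+1) o rem)
      else
        (if o + 1 == 3 then true else wrAltLoop cs (j+1) e (o+1) rem)
    else
      if j % 2 == 0 then wrAltLoop cs (j+1) 0 o rem
      else wrAltLoop cs (j+1) e 0 rem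

def word_reader_alt (word : String) : Bool :=
  wrAltLoop word.toList 0 0 0 (word.toList.length - 1)

-- ===== PRECONDITION & SPEC =====
def Spec_word_reader (word : String) (out : Bool) : Prop := out = word_reader_alt word
instance (word : String) (out : Bool) : Decidable (Spec_word_reader word out) := by unfold Spec_word_reader; infer_instance

-- ===== CLAIM (what is proved, stated in full; the proofs are below) =====
def Claim_equal_word_reader : Prop := ∀ (word : String), Dom_word_reader word → Spec_word_reader word (word_reader word)

-- ===== LEMMAS AND PROOFS =====

-- the adjacent-pair test at position j
def pr (cs : List Char) (j : Nat) : Bool := cs[j]? == cs[j+1]?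

-- closed form of the trigger condition of B's loop iteration k, entered at j with credits e (even parity) and o (odd)
def trig (cs : List Char) (j e o k : Nat) : Bool :=
  pr cs (j+k) &&
    (if 4 ≤ k then pr cs (j+k-2) && pr cs (j+k-4)
     else if 2 ≤ k then pr cs (j+k-2) && decide (1 ≤ (if (j+k) % 2 = 0 then e else o))
     else decide (2 ≤ (if (j+k) % 2 = 0 then e else o)))

theorem any_congr_mem {α : Type} {l : List α} {p q : α → Bool}
    (h : ∀ x ∈ l, p x = q x) : l.any p = l.any q := by
  induction l with
  | nil => rfl
  | cons a t ih =>
    simp only [List.any_cons, h a (List.mem_cons_self ..),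
      ih (fun x hx => h x (List.mem_cons_of_mem a hx))]

theorem wrLoop_eq_any (cs : List Char) :
    ∀ (rem i : Nat), wrLoop cs i rem =
      (List.range rem).any (fun k =>
        letter_checker cs[i+k]? cs[i+k+1]? cs[i+k+2]? cs[i+k+3]? cs[i+k+4]? cs[i+k+5]?) := by
  intro rem
  induction rem with
  | zero => intro i; simp [wrLoop]
  | succ r ih =>
    intro i
    rw [List.range_succ_eq_map]
    simp only [wrLoop, List.any_cons, List.any_map, Nat.add_zero]
    by_cases h : letter_checker cs[i]? cs[i+1]? cs[i+2]? cs[i+3]? cs[i+4]? cs[i+5]? = true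
    · simp [h]
    · simp only [h, Bool.false_or, ih (i+1)]
      refine List.any_congr rfl ?_
      intro a
      simp only [Function.comp_apply]
      rw [show i + 1 + a = i + Nat.succ a from by omega]

-- shift lemmas for trig, one per branch of the loop body
theorem trig_shift_true_even (cs : List Char) (j e o k : Nat)
    (hp : pr cs j = true) (hj : j % 2 = 0) :
    trig cs j e o (k+1) = trig cs (j+1) (e+1) o k := by
  unfold trig
  rw [show j + (k+1) = j + 1 + k from by omega]
  rcases Nat.lt_or_ge k 4 with h4 | h4
  · interval_cases k
    · simp only [show (j + 1 + 0) % 2 = 1 from by omega]; norm_num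
    · simp only [show (j + 1 + 1) % 2 = 0 from by omega,
        show ¬ (4 ≤ (2:Nat)) from by omega, show ¬ (4 ≤ (1:Nat)) from by omega,
        show (2:Nat) ≤ 2 from by omega, show ¬ (2 ≤ (1:Nat)) from by omega,
        if_true, if_false, show j + 1 + 1 - 2 = j from by omega, hp]
      simp
    · simp only [show (j + 1 + 2) % 2 = 1 from by omega,
        show ¬ (4 ≤ (3:Nat)) from by omega, show ¬ (4 ≤ (2:Nat)) from by omega,
        show (2:Nat) ≤ 3 from by omega, show (2:Nat) ≤ 2 from by omega,
        if_true, if_false, show j + 1 + 2 - 2 = j + 1 from by omega]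
      norm_num
    · simp only [show (j + 1 + 3) % 2 = 0 from by omega,
        show (4:Nat) ≤ 4 from by omega, show ¬ (4 ≤ (3:Nat)) from by omega,
        show (2:Nat) ≤ 3 from by omega,
        if_true, if_false, show j + 1 + 3 - 2 = j + 2 from by omega,
        show j + 1 + 3 - 4 = j from by omega, hp]
      simp
  · simp only [show 4 ≤ k + 1 from by omega, h4, if_true,
      show j + 1 + k - 2 = j + 1 + (k - 2) from by omega,
      show j + 1 + k - 4 = j + 1 + (k - 4) from by omega]

theorem trig_shift_true_odd (cs : List Char) (j e o k : Nat)
    (hp : pr cs j = true) (hj : j % 2 = 1) :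
    trig cs j e o (k+1) = trig cs (j+1) e (o+1) k := by
  unfold trig
  rw [show j + (k+1) = j + 1 + k from by omega]
  rcases Nat.lt_or_ge k 4 with h4 | h4
  · interval_cases k
    · simp only [show (j + 1 + 0) % 2 = 0 from by omega]; norm_num
    · simp only [show (j + 1 + 1) % 2 = 1 from by omega,
        show ¬ (4 ≤ (2:Nat)) from by omega, show ¬ (4 ≤ (1:Nat)) from by omega,
        show (2:Nat) ≤ 2 from by omega, show ¬ (2 ≤ (1:Nat)) from by omega,
        if_true, if_false, show j + 1 + 1 - 2 = j from by omega, hp]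
      norm_num
      congr 1
      rw [decide_eq_decide]
      omega
    · simp only [show (j + 1 + 2) % 2 = 0 from by omega,
        show ¬ (4 ≤ (3:Nat)) from by omega, show ¬ (4 ≤ (2:Nat)) from by omega,
        show (2:Nat) ≤ 3 from by omega, show (2:Nat) ≤ 2 from by omega,
        if_true, if_false, show j + 1 + 2 - 2 = j + 1 from by omega]
    · simp only [show (j + 1 + 3) % 2 = 1 from by omega,
        show (4:Nat) ≤ 4 from by omega, show ¬ (4 ≤ (3:Nat)) from by omega,
        show (2:Nat) ≤ 3 from by omega,
        if_true, if_false, show j + 1 + 3 - 2 = j + 2 from by omega,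
        show j + 1 + 3 - 4 = j from by omega, hp]
      norm_num
  · simp only [show 4 ≤ k + 1 from by omega, h4, if_true,
      show j + 1 + k - 2 = j + 1 + (k - 2) from by omega,
      show j + 1 + k - 4 = j + 1 + (k - 4) from by omega]

theorem trig_shift_false_even (cs : List Char) (j e o k : Nat)
    (hp : pr cs j = false) (hj : j % 2 = 0) :
    trig cs j e o (k+1) = trig cs (j+1) 0 o k := by
  unfold trig
  rw [show j + (k+1) = j + 1 + k from by omega]
  rcases Nat.lt_or_ge k 4 with h4 | h4
  · interval_cases k
    · simp only [show (j + 1 + 0) % 2 = 1 from by omega]; norm_num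
    · simp only [show (j + 1 + 1) % 2 = 0 from by omega,
        show ¬ (4 ≤ (2:Nat)) from by omega, show ¬ (4 ≤ (1:Nat)) from by omega,
        show (2:Nat) ≤ 2 from by omega, show ¬ (2 ≤ (1:Nat)) from by omega,
        if_true, if_false, show j + 1 + 1 - 2 = j from by omega, hp]
      norm_num
    · simp only [show (j + 1 + 2) % 2 = 1 from by omega,
        show ¬ (4 ≤ (3:Nat)) from by omega, show ¬ (4 ≤ (2:Nat)) from by omega,
        show (2:Nat) ≤ 3 from by omega, show (2:Nat) ≤ 2 from by omega,
        if_true, if_false, show j + 1 + 2 - 2 = j + 1 from by omega]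
      norm_num
    · simp only [show (j + 1 + 3) % 2 = 0 from by omega,
        show (4:Nat) ≤ 4 from by omega, show ¬ (4 ≤ (3:Nat)) from by omega,
        show (2:Nat) ≤ 3 from by omega,
        if_true, if_false, show j + 1 + 3 - 2 = j + 2 from by omega,
        show j + 1 + 3 - 4 = j from by omega, hp]
      norm_num
  · simp only [show 4 ≤ k + 1 from by omega, h4, if_true,
      show j + 1 + k - 2 = j + 1 + (k - 2) from by omega,
      show j + 1 + k - 4 = j + 1 + (k - 4) from by omega]

theorem trig_shift_false_odd (cs : List Char) (j e o k : Nat)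
    (hp : pr cs j = false) (hj : j % 2 = 1) :
    trig cs j e o (k+1) = trig cs (j+1) e 0 k := by
  unfold trig
  rw [show j + (k+1) = j + 1 + k from by omega]
  rcases Nat.lt_or_ge k 4 with h4 | h4
  · interval_cases k
    · simp only [show (j + 1 + 0) % 2 = 0 from by omega]; norm_num
    · simp only [show (j + 1 + 1) % 2 = 1 from by omega,
        show ¬ (4 ≤ (2:Nat)) from by omega, show ¬ (4 ≤ (1:Nat)) from by omega,
        show (2:Nat) ≤ 2 from by omega, show ¬ (2 ≤ (1:Nat)) from by omega,
        if_true, if_false, show j + 1 + 1 - 2 = j from by omega, hp]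
      norm_num
    · simp only [show (j + 1 + 2) % 2 = 0 from by omega,
        show ¬ (4 ≤ (3:Nat)) from by omega, show ¬ (4 ≤ (2:Nat)) from by omega,
        show (2:Nat) ≤ 3 from by omega, show (2:Nat) ≤ 2 from by omega,
        if_true, if_false, show j + 1 + 2 - 2 = j + 1 from by omega]
    · simp only [show (j + 1 + 3) % 2 = 1 from by omega,
        show (4:Nat) ≤ 4 from by omega, show ¬ (4 ≤ (3:Nat)) from by omega,
        show (2:Nat) ≤ 3 from by omega,
        if_true, if_false, show j + 1 + 3 - 2 = j + 2 from by omega,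
        show j + 1 + 3 - 4 = j from by omega, hp]
      norm_num
  · simp only [show 4 ≤ k + 1 from by omega, h4, if_true,
      show j + 1 + k - 2 = j + 1 + (k - 2) from by omega,
      show j + 1 + k - 4 = j + 1 + (k - 4) from by omega]

theorem trig00 (cs : List Char) (k : Nat) :
    trig cs 0 0 0 k = (decide (4 ≤ k) && (pr cs k && (pr cs (k-2) && pr cs (k-4)))) := by
  unfold trig
  simp only [Nat.zero_add]
  by_cases h4 : 4 ≤ k
  · simp [h4]
  · by_cases h2 : 2 ≤ k
    · simp [h4, h2]
    · simp [h4, h2]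

theorem wrAltLoop_eq_any (cs : List Char) :
    ∀ (rem j e o : Nat), e < 3 → o < 3 →
      wrAltLoop cs j e o rem = (List.range rem).any (trig cs j e o) := by
  intro rem
  induction rem with
  | zero => intro j e o _ _; simp [wrAltLoop]
  | succ r ih =>
    intro j e o he ho
    rw [List.range_succ_eq_map]
    simp only [List.any_cons, List.any_map]
    have head0 : trig cs j e o 0 =
        (pr cs j && decide (2 ≤ (if j % 2 = 0 then e else o))) := by
      simp [trig, show ¬ (4 ≤ (0:Nat)) from by omega, show ¬ (2 ≤ (0:Nat)) from by omega]
    by_cases hp : pr cs j = true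
    · by_cases hj : j % 2 = 0
      · have hbody : wrAltLoop cs j e o (r+1) =
            (if e + 1 == 3 then true else wrAltLoop cs (j+1) (e+1) o r) := by
          simp [wrAltLoop, pr] at hp ⊢; simp [hp, hj]
        rw [hbody]
        by_cases he2 : e + 1 = 3
        · have : trig cs j e o 0 = true := by
            rw [head0]; simp [hp, hj]; omega
          simp [he2, this]
        · have hif : (if (e + 1 == 3) then true else wrAltLoop cs (j+1) (e+1) o r)
              = wrAltLoop cs (j+1) (e+1) o r := by
            simp
            intro hE
            exact absurd (by omega) he2
          have hhead : trig cs j e o 0 = false := by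
            rw [head0]; simp [hp, hj]; omega
          rw [hif, hhead, Bool.false_or, ih (j+1) (e+1) o (by omega) ho]
          exact any_congr_mem (fun k _ => by
            simp only [Function.comp_apply, Nat.succ_eq_add_one]
            exact (trig_shift_true_even cs j e o k hp hj).symm)
      · have hj1 : j % 2 = 1 := by omega
        have hbody : wrAltLoop cs j e o (r+1) =
            (if o + 1 == 3 then true else wrAltLoop cs (j+1) e (o+1) r) := by
          simp [wrAltLoop, pr] at hp ⊢; simp [hp, hj]
        rw [hbody]
        by_cases ho2 : o + 1 = 3
        · have : trig cs j e o 0 = true := by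
            rw [head0]; simp [hp, hj]; omega
          simp [ho2, this]
        · have hif : (if (o + 1 == 3) then true else wrAltLoop cs (j+1) e (o+1) r)
              = wrAltLoop cs (j+1) e (o+1) r := by
            simp
            intro hO
            exact absurd (by omega) ho2
          have hhead : trig cs j e o 0 = false := by
            rw [head0]; simp [hp, hj]; omega
          rw [hif, hhead, Bool.false_or, ih (j+1) e (o+1) he (by omega)]
          exact any_congr_mem (fun k _ => by
            simp only [Function.comp_apply, Nat.succ_eq_add_one]
            exact (trig_shift_true_odd cs j e o k hp hj1).symm)
    · have hp' : pr cs j = false := by simpa using hp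
      have hhead : trig cs j e o 0 = false := by rw [head0]; simp [hp']
      by_cases hj : j % 2 = 0
      · have hbody : wrAltLoop cs j e o (r+1) = wrAltLoop cs (j+1) 0 o r := by
          simp [wrAltLoop, pr] at hp' ⊢; simp [hp', hj]
        rw [hbody, hhead, Bool.false_or, ih (j+1) 0 o (by omega) ho]
        exact any_congr_mem (fun k _ => by
          simp only [Function.comp_apply, Nat.succ_eq_add_one]
          exact (trig_shift_false_even cs j e o k hp' hj).symm)
      · have hj1 : j % 2 = 1 := by omega
        have hbody : wrAltLoop cs j e o (r+1) = wrAltLoop cs (j+1) e 0 r := by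
          simp [wrAltLoop, pr] at hp' ⊢; simp [hp', hj]
        rw [hbody, hhead, Bool.false_or, ih (j+1) e 0 he (by omega)]
        exact any_congr_mem (fun k _ => by
          simp only [Function.comp_apply, Nat.succ_eq_add_one]
          exact (trig_shift_false_odd cs j e o k hp' hj1).symm)

theorem word_reader_spec : Claim_equal_word_reader := by
  intro word _
  unfold Spec_word_reader word_reader word_reader_alt
  simp only []
  set cs := word.toList with hcs
  rw [wrAltLoop_eq_any cs (cs.length - 1) 0 0 0 (by omega) (by omega)]
  have hB : ((List.range (cs.length - 1)).any (trig cs 0 0 0) = true) ↔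
      (∃ k, k < cs.length - 1 ∧ 4 ≤ k ∧ (pr cs k && (pr cs (k-2) && pr cs (k-4))) = true) := by
    rw [List.any_eq_true]
    constructor
    · rintro ⟨k, hk, ht⟩
      rw [List.mem_range] at hk
      rw [trig00] at ht
      simp only [Bool.and_eq_true, decide_eq_true_eq] at ht
      exact ⟨k, hk, ht.1, by simp [ht.2]⟩
    · rintro ⟨k, hk, h4, h⟩
      exact ⟨k, List.mem_range.mpr hk, by rw [trig00]; simp [h4, h]⟩
  by_cases h : cs.length < 6
  · simp only [h, if_true]
    have hfalse : ((List.range (cs.length - 1)).any (trig cs 0 0 0)) = false := by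
      rw [← Bool.not_eq_true, hB]
      rintro ⟨k, hk, h4, _⟩
      omega
    rw [hfalse]
  · simp only [h, if_false]
    rw [wrLoop_eq_any, Bool.eq_iff_iff, List.any_eq_true, hB]
    constructor
    · rintro ⟨i, hi, hlc⟩
      rw [List.mem_range] at hi
      refine ⟨i + 4, by omega, by omega, ?_⟩
      unfold letter_checker at hlc
      unfold pr
      simp only [Nat.zero_add] at hlc
      simp only [Bool.and_eq_true] at hlc ⊢
      refine ⟨?_, ?_, ?_⟩
      · rw [show i+4+1 = i+5 from by omega]; exact hlc.2
      · rw [show i+4-2 = i+2 from by omega, show i+2+1 = i+3 from by omega]; exact hlc.1.2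
      · rw [show i+4-4 = i from by omega]; exact hlc.1.1
    · rintro ⟨k, hk, h4, hh⟩
      refine ⟨k - 4, List.mem_range.mpr (by omega), ?_⟩
      unfold letter_checker
      unfold pr at hh
      simp only [Nat.zero_add, Bool.and_eq_true] at hh ⊢
      refine ⟨⟨?_, ?_⟩, ?_⟩
      · rw [show k-4+1 = k-3 from by omega]
        have := hh.2.2
        rwa [show k-4+1 = k-3 from by omega] at this
      · rw [show k-4+2 = k-2 from by omega, show k-4+3 = k-1 from by omega]
        have := hh.2.1
        rwa [show k-2+1 = k-1 from by omega] at this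
      · rw [show k-4+4 = k from by omega, show k-4+5 = k+1 from by omega]
        exact hh.1
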